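-- pv_equiv track=rewrite | github.com/xavierfeltin/mtg_data_mining | genclose_analyzer.py | get_minimals
-- ===== SOURCE A (Python) =====
-- from itertools import combinations, chain
--
-- def get_minimals(X, Z1, gen_X_Y):
--     '''
--     Return Minimal{Rk = Sk\X | Sk belongs to G(X+Y), Rk included or equal to Z1}
--     :return: array of minimals
--     '''
--
--     if len(gen_X_Y) == 0: return []
--
--     minimals = []
--     min_len = len(Z1)
--     z1_combination = []
--     for i in range(len(Z1)):
--         z1_combination.extend(combinations(Z1, i + 1))
--     z1_combination.append(frozenset([]))  # simulate empty element
--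
--     for Sk in gen_X_Y:
--         Rk = frozenset(Sk).difference(frozenset(X))
--         # if is_in_generators(Rk, gen_X_Y):
--         if len(Rk) == 0:
--             minimals.append(frozenset([]))
--         else:
--             found = False
--             for comb in z1_combination:
--                 if Rk == frozenset(comb):
--                     found = True
--                     break
--             if found:
--                 minimals.append(Rk)
--                 if min_len > len(Rk):
--                     min_len = len(Rk)
--
--     for min in minimals:
--         if len(min) > min_len:
--             minimals.remove(min)
--
--     return minimals
-- ===== SOURCE B (Python) =====
-- def get_minimals(X, Z1, gen_X_Y):
--     '''Return Minimal{Rk = Sk\\X | Sk in G(X+Y), Rk <= Z1}: test Rk <= Z1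
--     directly and keep only the minimum-length results.'''
--     if not gen_X_Y:
--         return []
--     xs, z1 = frozenset(X), frozenset(Z1)
--     kept = [Rk for Rk in (frozenset(Sk) - xs for Sk in gen_X_Y) if Rk <= z1]
--     min_len = len(Z1)
--     for Rk in kept:
--         if Rk:
--             min_len = min(min_len, len(Rk))
--     return [Rk for Rk in kept if len(Rk) <= min_len]
-- ===== Notes on version B (the rewrite author's own statement) =====
-- stated objective: faster
-- what changed: B replaces A's enumeration of all 2^len(Z1) combinations of Z1 (rebuilt into frozensets and scanned per candidate) by a direct Rk <= set(Z1) subset test, and keeps the minimum-length results with a plain filter instead of removing from the list while iterating it.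
-- intended difference: On inputs where two oversized candidate sets Rk = Sk\X <= Z1 are adjacent in scan order, A's remove-while-iterating pass skips one of them and returns it although it is longer than the minimum (e.g. A returns [{1,3},{1}] on the witness); B returns only the minimum-length sets ([{1}]), which is the function's stated purpose ('Return Minimal{...}'). — e.g. on get_minimals([], [1, 2, 3], [[1, 2], [1, 3], [1]]): A returns [[1, 3], [1]], B returns [[1]]
import Mathlib
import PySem

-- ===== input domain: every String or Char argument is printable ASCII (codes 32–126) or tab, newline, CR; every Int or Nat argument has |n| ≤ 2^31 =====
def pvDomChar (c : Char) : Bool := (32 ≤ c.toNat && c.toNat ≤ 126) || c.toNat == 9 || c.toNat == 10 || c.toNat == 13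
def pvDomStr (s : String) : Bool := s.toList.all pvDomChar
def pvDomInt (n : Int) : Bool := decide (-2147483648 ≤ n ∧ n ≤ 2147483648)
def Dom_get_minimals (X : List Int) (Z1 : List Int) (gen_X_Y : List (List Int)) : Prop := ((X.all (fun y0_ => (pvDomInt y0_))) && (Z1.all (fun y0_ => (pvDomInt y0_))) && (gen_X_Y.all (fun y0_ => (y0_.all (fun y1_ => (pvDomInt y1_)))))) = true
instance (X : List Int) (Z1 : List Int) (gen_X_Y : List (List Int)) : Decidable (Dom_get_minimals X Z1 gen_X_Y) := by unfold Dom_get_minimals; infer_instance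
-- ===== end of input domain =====

-- B replaces A's enumeration of all 2^|Z1| combinations of Z1 by a direct subset test,
-- and keeps only the minimum-length results with a plain filter instead of
-- removing from the list while iterating it (see D_ below for where that differs).

-- ===== PORT A =====

-- frozenset(Sk).difference(frozenset(X))
def pvRk (X Sk : List Int) : PySem.Set Int :=
  PySem.Set.diff (PySem.Set.ofList Sk) (PySem.Set.ofList X)

-- itertools.combinations(l, r): all r-element subsequences of l, in order
def pvCombos : Nat → List Int → List (List Int)
  | 0, _ => [[]]
  | _+1, [] => []
  | r+1, x :: xs => (pvCombos r xs).map (fun c => x :: c) ++ pvCombos (r+1) xs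

-- minimals.remove(v): remove the first element set-equal (Python ==) to v
def pvEraseFirst (l : List (List Int)) (v : List Int) : List (List Int) :=
  match l with
  | [] => []
  | h :: t => if PySem.Set.equal h v then t else h :: pvEraseFirst t v

theorem pvEraseFirst_length_le (l : List (List Int)) (v : List Int) :
    (pvEraseFirst l v).length ≤ l.length := by
  induction l with
  | nil => simp [pvEraseFirst]
  | cons h t ih => simp only [pvEraseFirst]; split <;> simp only [List.length_cons] <;> omega

-- 'for min in minimals: if len(min) > min_len: minimals.remove(min)'
-- Python for-loop over a list mutated in place: index cursor k advances each step
def pvRemoveLoop (l : List (List Int)) (k : Nat) (min_len : Nat) : List (List Int) :=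
  if h : k < l.length then
    let v := l[k]
    if v.length > min_len then pvRemoveLoop (pvEraseFirst l v) (k+1) min_len
    else pvRemoveLoop l (k+1) min_len
  else l
termination_by l.length - k
decreasing_by
  · have := pvEraseFirst_length_le l l[k]; omega
  · omega

def get_minimals (X : List Int) (Z1 : List Int) (gen_X_Y : List (List Int)) : List (List Int) :=
  if gen_X_Y.length == 0 then [] else
  let min_len := Z1.length
  let z1_combination :=
    ((List.range Z1.length).foldl (fun acc i => acc ++ pvCombos (i+1) Z1) []) ++ [([] : List Int)]
  let st := gen_X_Y.foldl (fun (st : List (List Int) × Nat) Sk =>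
      let Rk := pvRk X Sk
      if Rk.length = 0 then (st.1 ++ [([] : List Int)], st.2)
      else
        let found := z1_combination.any (fun comb => PySem.Set.equal Rk (PySem.Set.ofList comb))
        if found then
          (st.1 ++ [Rk], if st.2 > Rk.length then Rk.length else st.2)
        else st) ([], min_len)
  pvRemoveLoop st.1 0 st.2

-- ===== PORT B =====

def get_minimals_alt (X : List Int) (Z1 : List Int) (gen_X_Y : List (List Int)) : List (List Int) :=
  if gen_X_Y.isEmpty then [] else
  let xs := PySem.Set.ofList X
  let z1 := PySem.Set.ofList Z1
  let kept := (gen_X_Y.map (fun Sk => PySem.Set.diff (PySem.Set.ofList Sk) xs)).filter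
      (fun Rk => PySem.Set.issubset Rk z1)
  let min_len := kept.foldl (fun m Rk => if !Rk.isEmpty then Nat.min m Rk.length else m) Z1.length
  kept.filter (fun Rk => Rk.length ≤ min_len)

-- ===== PRECONDITION & SPEC =====

-- On inputs where two oversized candidate sets Rk = Sk\X ⊆ Z1 are adjacent in scan order
-- (both longer than some positive candidate length), A's remove-while-iterating pass skips
-- one of them and returns it although it is longer than the minimum; B returns only the
-- minimum-length sets, which is the function's stated purpose ('Return Minimal{…}').
def D_get_minimals (X : List Int) (Z1 : List Int) (gen_X_Y : List (List Int)) : Prop :=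
  let ls := (gen_X_Y.map (pvRk X)).filter (PySem.Set.issubset · Z1) |>.map List.length
  ∃ q ∈ ls.zipWith min ls.tail, ∃ r ∈ ls, 0 < r ∧ r < q
instance (X : List Int) (Z1 : List Int) (gen_X_Y : List (List Int)) : Decidable (D_get_minimals X Z1 gen_X_Y) := by unfold D_get_minimals; infer_instance

def Spec_get_minimals (X : List Int) (Z1 : List Int) (gen_X_Y : List (List Int)) (out : List (List Int)) : Prop := ¬ D_get_minimals X Z1 gen_X_Y → out = get_minimals_alt X Z1 gen_X_Y
instance (X : List Int) (Z1 : List Int) (gen_X_Y : List (List Int)) (out : List (List Int)) : Decidable (Spec_get_minimals X Z1 gen_X_Y out) := by unfold Spec_get_minimals; infer_instance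

def pvDiffWitness_get_minimals : List Int × List Int × List (List Int) :=
  ([], [1, 2, 3], [[1, 2], [1, 3], [1]])
def pvDiffWitnessOut_get_minimals : (List (List Int)) × (List (List Int)) :=
  ([[1, 3], [1]], [[1]])

-- ===== CLAIM (what is proved, stated in full; the proofs are below) =====
def Claim_unchanged_get_minimals : Prop := ∀ (X : List Int) (Z1 : List Int) (gen_X_Y : List (List Int)), Dom_get_minimals X Z1 gen_X_Y → Spec_get_minimals X Z1 gen_X_Y (get_minimals X Z1 gen_X_Y)
def Claim_changed_get_minimals : Prop := Dom_get_minimals (pvDiffWitness_get_minimals.1) (pvDiffWitness_get_minimals.2.1) (pvDiffWitness_get_minimals.2.2) ∧ D_get_minimals (pvDiffWitness_get_minimals.1) (pvDiffWitness_get_minimals.2.1) (pvDiffWitness_get_minimals.2.2) ∧ get_minimals (pvDiffWitness_get_minimals.1) (pvDiffWitness_get_minimals.2.1) (pvDiffWitness_get_minimals.2.2) = pvDiffWitnessOut_get_minimals.1 ∧ get_minimals_alt (pvDiffWitness_get_minimals.1) (pvDiffWitness_get_minimals.2.1) (pvDiffWitness_get_minimals.2.2) = pvDiffWitnessOut_get_minimals.2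 ∧ pvDiffWitnessOut_get_minimals.1 ≠ pvDiffWitnessOut_get_minimals.2
def Claim_exact_get_minimals : Prop := ∀ (X : List Int) (Z1 : List Int) (gen_X_Y : List (List Int)), Dom_get_minimals X Z1 gen_X_Y → D_get_minimals X Z1 gen_X_Y → get_minimals X Z1 gen_X_Y ≠ get_minimals_alt X Z1 gen_X_Y

-- ===== LEMMAS AND PROOFS =====

-- the scan A's removal pass performs on the candidate lengths: deleting an oversized
-- entry skips the next one; true iff a skipped entry is itself oversized (> m)
def pvSkipBad (m : Nat) : List Nat → Bool
  | [] => false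
  | [_] => false
  | l :: c :: rest' =>
    if m < l then decide (m < c) || pvSkipBad m rest'
    else pvSkipBad m (c :: rest')

theorem pvSkipBad_cons_le (m l : Nat) (r : List Nat) (h : ¬ m < l) :
    pvSkipBad m (l :: r) = pvSkipBad m r := by
  cases r <;> simp [pvSkipBad, h]

theorem pvSkipBad_cons_lt (m l c : Nat) (r : List Nat) (h : m < l) :
    pvSkipBad m (l :: c :: r) = (decide (m < c) || pvSkipBad m r) := by
  simp [pvSkipBad, h]

-- D_'s adjacency test being false means the scan never skips an oversized entry
theorem adj_false (m : Nat) : ∀ (n : Nat) (ls : List Nat), ls.length ≤ n →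
    ((ls.zip ls.tail).any fun p => decide (m < p.1) && decide (m < p.2)) = false →
    pvSkipBad m ls = false := by
  intro n
  induction n with
  | zero =>
    intro ls h _
    have : ls = [] := List.eq_nil_of_length_eq_zero (by omega)
    subst this; rfl
  | succ n ih =>
    intro ls hlen hadj
    match ls with
    | [] => rfl
    | [_] => rfl
    | l :: c :: r =>
      simp only [List.tail_cons, List.zip_cons_cons, List.any_cons, Bool.or_eq_false_iff,
        Bool.and_eq_false_iff, decide_eq_false_iff_not, Nat.not_lt] at hadj
      have hcr : ((( c :: r).zip (c :: r).tail).any fun p => decide (m < p.1) && decide (m < p.2)) = false := by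
        simpa using hadj.2
      by_cases hl : m < l
      · rw [pvSkipBad_cons_lt m l c r hl]
        have hc : ¬ m < c := by rcases hadj.1 with h | h <;> omega
        have hr : ((r.zip r.tail).any fun p => decide (m < p.1) && decide (m < p.2)) = false := by
          cases r with
          | nil => rfl
          | cons d r' =>
            simp only [List.tail_cons, List.zip_cons_cons, List.any_cons,
              Bool.or_eq_false_iff] at hcr
            simpa using hcr.2
        simp only [decide_eq_false hc, Bool.false_or]
        exact ih r (by simp only [List.length_cons] at hlen ⊢; omega) hr
      · rw [pvSkipBad_cons_le m l (c :: r) hl]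
        exact ih (c :: r) (by simp only [List.length_cons] at hlen ⊢; omega) hcr

-- B's kept list: the candidate sets Sk\X that are subsets of Z1
def pvKept (X Z1 : List Int) (gen : List (List Int)) : List (List Int) :=
  (gen.map (fun Sk => PySem.Set.diff (PySem.Set.ofList Sk) (PySem.Set.ofList X))).filter
    (fun Rk => PySem.Set.issubset Rk Z1)

-- the min-length fold, on the kept sets themselves
def pvMinS (m : Nat) (ks : List (List Int)) : Nat :=
  ks.foldl (fun m Rk => if 0 < Rk.length ∧ Rk.length < m then Rk.length else m) m

theorem equal_refl (v : List Int) : PySem.Set.equal v v = true := by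
  rw [PySem.Set.equal_iff]; intro x; rfl

-- every subsequence of l of length r is produced by pvCombos r l
theorem mem_pvCombos_of_sublist {s l : List Int} (h : s.Sublist l) :
    s ∈ pvCombos s.length l := by
  induction h with
  | slnil => exact List.mem_singleton.mpr rfl
  | @cons l₁ l₂ a h ih =>
    cases l₁ with
    | nil => exact List.mem_singleton.mpr rfl
    | cons b t => simp only [List.length_cons, pvCombos, List.mem_append]; right; exact ih
  | @cons₂ l₁ l₂ a h ih =>
    simp only [List.length_cons, pvCombos, List.mem_append, List.mem_map]
    exact Or.inl ⟨_, ih, rfl⟩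

-- every element of pvCombos r l is a sublist of l
theorem sublist_of_mem_pvCombos : ∀ (r : Nat) (l c : List Int), c ∈ pvCombos r l → c.Sublist l := by
  intro r
  induction r with
  | zero => intro l c hc; simp [pvCombos] at hc; simp [hc]
  | succ r ih =>
    intro l
    induction l with
    | nil => intro c hc; simp [pvCombos] at hc
    | cons x xs ihl =>
      intro c hc
      simp only [pvCombos, List.mem_append, List.mem_map] at hc
      rcases hc with ⟨d, hd, rfl⟩ | hc
      · exact List.Sublist.cons₂ x (ih xs d hd)
      · exact List.Sublist.cons x (ihl c hc)

-- A's 'found' (scan of all combinations) is exactly a subset test, for nonempty nodup Rk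
theorem found_iff_subset (Rk Z1 : List Int) (hne : Rk ≠ []) :
    ((((List.range Z1.length).foldl (fun acc i => acc ++ pvCombos (i+1) Z1) []) ++ [([] : List Int)]).any
        (fun comb => PySem.Set.equal Rk (PySem.Set.ofList comb)))
      = PySem.Set.issubset Rk (PySem.Set.ofList Z1) := by
  rw [PySem.List.foldl_append_eq_flatMap]
  simp only [List.nil_append]
  by_cases hsub : PySem.Set.issubset Rk (PySem.Set.ofList Z1) = true
  · rw [hsub, List.any_eq_true]
    refine ⟨Z1.filter (fun z => Rk.contains z), ?_, ?_⟩
    · rw [List.mem_append, List.mem_flatMap]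
      left
      have hsl : (Z1.filter (fun z => Rk.contains z)).Sublist Z1 := List.filter_sublist
      have hlen : (Z1.filter (fun z => Rk.contains z)).length ≤ Z1.length := hsl.length_le
      have hpos : 0 < (Z1.filter (fun z => Rk.contains z)).length := by
        rcases List.exists_mem_of_ne_nil Rk hne with ⟨a, ha⟩
        have haz : a ∈ Z1 := by
          rw [PySem.Set.issubset_iff] at hsub
          have := hsub a ha
          rwa [PySem.Set.mem_ofList] at this
        have : a ∈ Z1.filter (fun z => Rk.contains z) := by
          rw [List.mem_filter]; exact ⟨haz, by simpa using ha⟩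
        exact List.length_pos_of_mem this
      refine ⟨(Z1.filter (fun z => Rk.contains z)).length - 1, ?_, ?_⟩
      · rw [List.mem_range]; omega
      · have : (Z1.filter (fun z => Rk.contains z)).length - 1 + 1
            = (Z1.filter (fun z => Rk.contains z)).length := by omega
        rw [this]; exact mem_pvCombos_of_sublist hsl
    · rw [PySem.Set.equal_iff]
      intro x
      rw [PySem.Set.mem_ofList, List.mem_filter]
      constructor
      · intro hx
        refine ⟨?_, by simpa using hx⟩
        rw [PySem.Set.issubset_iff] at hsub
        have := hsub x hx; rwa [PySem.Set.mem_ofList] at this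
      · intro hx; simpa using hx.2
  · rw [Bool.not_eq_true] at hsub
    rw [hsub, List.any_eq_false]
    intro comb hcomb
    rw [List.mem_append, List.mem_flatMap] at hcomb
    intro heq
    rw [PySem.Set.equal_iff] at heq
    rcases hcomb with ⟨i, _, hc⟩ | hc
    · have hsl : comb.Sublist Z1 := sublist_of_mem_pvCombos _ _ _ hc
      have htrue : PySem.Set.issubset Rk (PySem.Set.ofList Z1) = true := by
        rw [PySem.Set.issubset_iff]
        intro x hx
        rw [PySem.Set.mem_ofList]
        have : x ∈ PySem.Set.ofList comb := (heq x).mp hx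
        rw [PySem.Set.mem_ofList] at this
        exact hsl.mem this
      rw [htrue] at hsub; cases hsub
    · simp only [List.mem_singleton] at hc
      subst hc
      rcases List.exists_mem_of_ne_nil Rk hne with ⟨a, ha⟩
      have := (heq a).mp ha
      simp at this

theorem issubset_ofList (s t : List Int) :
    PySem.Set.issubset s (PySem.Set.ofList t) = PySem.Set.issubset s t := by
  rw [Bool.eq_iff_iff, PySem.Set.issubset_iff, PySem.Set.issubset_iff]
  simp [PySem.Set.mem_ofList]

theorem issubset_nil (t : List Int) : PySem.Set.issubset ([] : List Int) t = true := by
  rw [PySem.Set.issubset_iff]; intro x hx; cases hx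

-- a set equal (as a set) to a nodup list is at least as long
theorem any_equal_false (m : Nat) (left : List (List Int)) (v : List Int)
    (hv : v.Nodup) (hlen : m < v.length) (h : ∀ w ∈ left, w.length ≤ m) :
    left.any (fun w => PySem.Set.equal w v) = false := by
  rw [List.any_eq_false]
  intro w hw heq
  have hmem := (PySem.Set.equal_iff w v).mp heq
  have hle : v.length ≤ w.length := by
    have h1 : v.toFinset.card = v.length := List.toFinset_card_of_nodup hv
    have h2 : v.toFinset.card = w.toFinset.card := by
      congr 1; ext a; simp only [List.mem_toFinset]; exact (hmem a).symm
    have h3 : w.toFinset.card ≤ w.length := w.toFinset_card_le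
    omega
  have := h w hw; omega

-- pvEraseFirst on left ++ v :: rest, when no element of left matches v
theorem eraseFirst_append_of_no_match (left : List (List Int)) (v : List Int) (r : List (List Int))
    (h : left.any (fun w => PySem.Set.equal w v) = false) :
    pvEraseFirst (left ++ v :: r) v = left ++ r := by
  induction left with
  | nil => simp [pvEraseFirst, equal_refl]
  | cons a t ih =>
    simp only [List.any_cons, Bool.or_eq_false_iff] at h
    simp only [List.cons_append, pvEraseFirst, h.1, if_false, ih h.2, Bool.false_eq_true]

-- pvEraseFirst on left ++ r, when some element of left matches v
theorem eraseFirst_append_of_match (left : List (List Int)) (v : List Int) (r : List (List Int))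
    (h : left.any (fun w => PySem.Set.equal w v) = true) :
    pvEraseFirst (left ++ r) v = pvEraseFirst left v ++ r ∧
      (pvEraseFirst left v).length + 1 = left.length := by
  induction left with
  | nil => simp at h
  | cons a t ih =>
    simp only [List.cons_append, pvEraseFirst]
    by_cases ha : PySem.Set.equal a v = true
    · simp [ha]
    · simp only [List.any_cons, Bool.or_eq_true] at h
      rcases h with h | h
      · exact absurd h ha
      · have := ih h
        rw [Bool.not_eq_true] at ha
        simp only [ha, Bool.false_eq_true, if_false, List.length_cons]
        constructor
        · rw [this.1]; simp
        · omega

theorem getElem_append_cons_len (left : List (List Int)) (v : List Int) (r : List (List Int))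
    (h : left.length < (left ++ v :: r).length) : (left ++ v :: r)[left.length] = v := by
  rw [List.getElem_append_right (le_refl left.length)]
  simp

-- the remove-while-iterating loop is a plain filter when no oversized entry gets skipped
theorem removeLoop_eq_filter (m : Nat) : ∀ (n : Nat) (right : List (List Int)), right.length ≤ n →
    pvSkipBad m (right.map List.length) = false →
    (∀ w ∈ right, w.Nodup) →
    ∀ (left : List (List Int)), (∀ w ∈ left, w.length ≤ m) →
    pvRemoveLoop (left ++ right) left.length m = left ++ right.filter (fun w => w.length ≤ m) := by
  intro n
  induction n with
  | zero =>
    intro right hr _ _ left _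
    have : right = [] := List.eq_nil_of_length_eq_zero (by omega)
    subst this
    rw [pvRemoveLoop]
    simp
  | succ n ih =>
    intro right hr hbad hnd left hsmall
    cases right with
    | nil => rw [pvRemoveLoop]; simp
    | cons v rest =>
      have hk : left.length < (left ++ v :: rest).length := by simp
      rw [pvRemoveLoop, dif_pos hk, getElem_append_cons_len left v rest hk]
      by_cases hov : v.length > m
      · simp only [if_pos hov]
        have hvn : v.Nodup := hnd v (by simp)
        have hnomatch := any_equal_false m left v hvn hov hsmall
        rw [eraseFirst_append_of_no_match left v rest hnomatch]
        cases rest with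
        | nil =>
          rw [pvRemoveLoop]
          simp only [List.append_nil]
          rw [dif_neg (by simp)]
          have : ¬ (v.length ≤ m) := by omega
          simp [this]
        | cons c rest' =>
          rw [List.map_cons, List.map_cons, pvSkipBad_cons_lt m v.length c.length _ hov] at hbad
          simp only [Bool.or_eq_false_iff, decide_eq_false_iff_not, Nat.not_lt] at hbad
          have h1 : left ++ c :: rest' = (left ++ [c]) ++ rest' := by simp
          have h2 : left.length + 1 = (left ++ [c]).length := by simp
          rw [h1, h2, ih rest' (by simp at hr; omega) hbad.2
              (fun w hw => hnd w (by simp [hw]))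
              (left ++ [c])
              (by intro w hw; simp at hw
                  rcases hw with hw | hw
                  · exact hsmall w hw
                  · subst hw; exact hbad.1)]
          simp only [List.filter_cons]
          have : ¬ (v.length ≤ m) := by omega
          simp [this, hbad.1]
      · simp only [if_neg hov]
        have h1 : left ++ v :: rest = (left ++ [v]) ++ rest := by simp
        have h2 : left.length + 1 = (left ++ [v]).length := by simp
        have hbad' : pvSkipBad m (rest.map List.length) = false := by
          rw [List.map_cons, pvSkipBad_cons_le m v.length _ (by omega)] at hbad
          exact hbad
        rw [h1, h2, ih rest (by simp at hr; omega) hbad'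
            (fun w hw => hnd w (by simp [hw]))
            (left ++ [v])
            (by intro w hw; simp at hw
                rcases hw with hw | hw
                · exact hsmall w hw
                · subst hw; omega)]
        simp only [List.filter_cons]
        have : v.length ≤ m := by omega
        simp [this]

-- A's combination-scan fold step, rewritten with the subset test
theorem fold_steps_eq (X Z1 : List Int) :
    (fun (st : List (List Int) × Nat) Sk =>
      let Rk := pvRk X Sk
      if Rk.length = 0 then (st.1 ++ [([] : List Int)], st.2)
      else
        let found := ((((List.range Z1.length).foldl (fun acc i => acc ++ pvCombos (i+1) Z1) []) ++ [([] : List Int)]).any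
            (fun comb => PySem.Set.equal Rk (PySem.Set.ofList comb)))
        if found then
          (st.1 ++ [Rk], if st.2 > Rk.length then Rk.length else st.2)
        else st)
    = (fun (st : List (List Int) × Nat) Sk =>
      let Rk := PySem.Set.diff (PySem.Set.ofList Sk) (PySem.Set.ofList X)
      if Rk.length = 0 then (st.1 ++ [([] : List Int)], st.2)
      else if PySem.Set.issubset Rk Z1 then
        (st.1 ++ [Rk], if st.2 > Rk.length then Rk.length else st.2)
      else st) := by
  funext st Sk
  simp only [pvRk]
  set Rk := PySem.Set.diff (PySem.Set.ofList Sk) (PySem.Set.ofList X) with hRk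
  by_cases hz : Rk.length = 0
  · simp [hz]
  · have hne : Rk ≠ [] := by intro h; exact hz (by simp [h])
    simp only [if_neg hz, found_iff_subset Rk Z1 hne, issubset_ofList]

-- the rewritten fold computes B's kept list and A's running minimum
theorem fold_char (X Z1 : List Int) (gen : List (List Int)) : ∀ (acc : List (List Int)) (m : Nat),
    gen.foldl (fun (st : List (List Int) × Nat) Sk =>
      let Rk := PySem.Set.diff (PySem.Set.ofList Sk) (PySem.Set.ofList X)
      if Rk.length = 0 then (st.1 ++ [([] : List Int)], st.2)
      else if PySem.Set.issubset Rk Z1 then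
        (st.1 ++ [Rk], if st.2 > Rk.length then Rk.length else st.2)
      else st) (acc, m)
    = (acc ++ pvKept X Z1 gen, pvMinS m (pvKept X Z1 gen)) := by
  induction gen with
  | nil => intro acc m; simp [pvKept, pvMinS]
  | cons Sk gen ih =>
    intro acc m
    rw [List.foldl_cons]
    simp only
    set Rk := PySem.Set.diff (PySem.Set.ofList Sk) (PySem.Set.ofList X) with hRk
    have hkept : pvKept X Z1 (Sk :: gen)
        = if PySem.Set.issubset Rk Z1 then Rk :: pvKept X Z1 gen
          else pvKept X Z1 gen := by
      simp only [pvKept, List.map_cons, List.filter_cons, ← hRk]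
    by_cases hz : Rk.length = 0
    · have hRknil : Rk = [] := List.eq_nil_of_length_eq_zero hz
      rw [if_pos hz, ih]
      rw [hkept, hRknil, if_pos (issubset_nil _)]
      simp [pvMinS, List.foldl_cons, List.append_assoc]
    · rw [if_neg hz]
      by_cases hsub : PySem.Set.issubset Rk Z1 = true
      · rw [if_pos hsub, ih, hkept, if_pos hsub]
        simp only [pvMinS, List.foldl_cons, List.append_assoc, List.singleton_append]
        refine congrArg₂ Prod.mk rfl ?_
        congr 1
        split_ifs <;> omega
      · rw [if_neg hsub, ih, hkept, if_neg hsub]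

-- B's min-fold step equals the fold step used in fold_char
theorem minB_eq (d : Nat) (ks : List (List Int)) :
    ks.foldl (fun m Rk => if !Rk.isEmpty then Nat.min m Rk.length else m) d = pvMinS d ks := by
  unfold pvMinS
  congr 1
  funext m Rk
  cases Rk with
  | nil => simp
  | cons a t =>
    simp only [List.isEmpty_cons, Bool.not_false, if_true, List.length_cons]
    simp only [Nat.min_def]
    split_ifs <;> omega

theorem nodup_kept (X Z1 : List Int) (gen : List (List Int)) :
    ∀ w ∈ pvKept X Z1 gen, w.Nodup := by
  intro w hw
  unfold pvKept at hw
  rw [List.mem_filter] at hw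
  rcases List.mem_map.mp hw.1 with ⟨Sk, _, rfl⟩
  exact PySem.Set.nodup_diff _ _ (PySem.Set.nodup_ofList Sk)

-- kept sets are sets of elements of Z1, so no longer than Z1
theorem kept_len_le (X Z1 : List Int) (gen : List (List Int)) :
    ∀ w ∈ pvKept X Z1 gen, w.length ≤ Z1.length := by
  intro w hw
  have hnd : w.Nodup := nodup_kept X Z1 gen w hw
  have hw' := hw
  unfold pvKept at hw'
  rw [List.mem_filter] at hw'
  have hsub := (PySem.Set.issubset_iff w Z1).mp hw'.2
  have h1 : w.toFinset.card = w.length := List.toFinset_card_of_nodup hnd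
  have h2 : w.toFinset ⊆ Z1.toFinset := by
    intro a ha
    rw [List.mem_toFinset] at ha ⊢
    exact hsub a ha
  have h3 := Finset.card_le_card h2
  have h4 : Z1.toFinset.card ≤ Z1.length := Z1.toFinset_card_le
  omega

-- the running minimum is the start value or a positive kept length
theorem minS_mem (ks : List (List Int)) : ∀ (d : Nat),
    pvMinS d ks = d ∨ (0 < pvMinS d ks ∧ ∃ w ∈ ks, w.length = pvMinS d ks) := by
  induction ks with
  | nil => intro d; left; rfl
  | cons k t ih =>
    intro d
    have step : pvMinS d (k :: t)
        = pvMinS (if 0 < k.length ∧ k.length < d then k.length else d) t := rfl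
    rw [step]
    by_cases hc : 0 < k.length ∧ k.length < d
    · rw [if_pos hc]
      rcases ih k.length with h | ⟨hpos, w, hwmem, he⟩
      · right
        refine ⟨by omega, k, by simp, by omega⟩
      · right
        exact ⟨hpos, w, by simp [hwmem], he⟩
    · rw [if_neg hc]
      rcases ih d with h | ⟨hpos, w, hwmem, he⟩
      · left; exact h
      · right; exact ⟨hpos, w, by simp [hwmem], he⟩

theorem zipmin_map (l1 l2 : List Nat) :
    l1.zipWith min l2 = (l1.zip l2).map fun p => min p.1 p.2 := by
  induction l1 generalizing l2 with
  | nil => simp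
  | cons a t ih => cases l2 <;> simp [ih]

-- an adjacent pair of kept lengths above the running minimum yields D_
theorem old_to_new (X Z1 : List Int) (gen : List (List Int))
    (h : ((((pvKept X Z1 gen).map List.length).zip ((pvKept X Z1 gen).map List.length).tail).any
        fun p => decide (pvMinS Z1.length (pvKept X Z1 gen) < p.1) &&
                 decide (pvMinS Z1.length (pvKept X Z1 gen) < p.2)) = true) :
    D_get_minimals X Z1 gen := by
  rw [List.any_eq_true] at h
  rcases h with ⟨p, hpmem, hp⟩
  simp only [Bool.and_eq_true, decide_eq_true_eq] at hp
  have hp1 : p.1 ∈ (pvKept X Z1 gen).map List.length := (List.of_mem_zip hpmem).1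
  have hple : p.1 ≤ Z1.length := by
    rcases List.mem_map.mp hp1 with ⟨w, hwmem, hlen⟩
    have := kept_len_le X Z1 gen w hwmem
    omega
  have hmem : 0 < pvMinS Z1.length (pvKept X Z1 gen) ∧
      pvMinS Z1.length (pvKept X Z1 gen) ∈ (pvKept X Z1 gen).map List.length := by
    rcases minS_mem (pvKept X Z1 gen) Z1.length with hd | ⟨hpos, w, hwmem, he⟩
    · omega
    · exact ⟨hpos, List.mem_map.mpr ⟨w, hwmem, he⟩⟩
  show ∃ q ∈ ((pvKept X Z1 gen).map List.length).zipWith min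
        ((pvKept X Z1 gen).map List.length).tail,
      ∃ r ∈ (pvKept X Z1 gen).map List.length,
        0 < r ∧ r < q
  refine ⟨min p.1 p.2, ?_, pvMinS Z1.length (pvKept X Z1 gen), hmem.2, hmem.1, by omega⟩
  rw [zipmin_map]
  exact List.mem_map.mpr ⟨p, hpmem, rfl⟩

-- an adjacent pair of oversized sets, as a recursive test
def hasAdjB (m : Nat) : List (List Int) → Bool
  | v :: c :: r => (decide (m < v.length) && decide (m < c.length)) || hasAdjB m (c :: r)
  | _ => false

-- the running minimum is at most the start value and every positive kept length
theorem minS_le (ks : List (List Int)) : ∀ (d : Nat),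
    pvMinS d ks ≤ d ∧ ∀ w ∈ ks, 0 < w.length → pvMinS d ks ≤ w.length := by
  induction ks with
  | nil => intro d; exact ⟨le_refl d, by simp⟩
  | cons k t ih =>
    intro d
    have step : pvMinS d (k :: t)
        = pvMinS (if 0 < k.length ∧ k.length < d then k.length else d) t := rfl
    rw [step]
    by_cases hc : 0 < k.length ∧ k.length < d
    · rw [if_pos hc]
      have h1 := (ih k.length).1
      refine ⟨by omega, ?_⟩
      intro w hw hwpos
      rcases List.mem_cons.mp hw with rfl | hwt
      · omega
      · exact (ih k.length).2 w hwt hwpos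
    · rw [if_neg hc]
      have h1 := (ih d).1
      refine ⟨h1, ?_⟩
      intro w hw hwpos
      rcases List.mem_cons.mp hw with rfl | hwt
      · omega
      · exact (ih d).2 w hwt hwpos

-- a pair of adjacent oversized sets makes hasAdjB true
theorem zip_adj_to_hasAdj (m : Nat) : ∀ (l : List (List Int)) (p : List Int × List Int),
    p ∈ l.zip l.tail → m < p.1.length → m < p.2.length → hasAdjB m l = true := by
  intro l
  induction l with
  | nil => intro p hp; cases hp
  | cons a t ih =>
    intro p hp h1 h2
    cases t with
    | nil => cases hp
    | cons b t' =>
      simp only [List.tail_cons, List.zip_cons_cons, List.mem_cons] at hp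
      show ((decide (m < a.length) && decide (m < b.length)) || hasAdjB m (b :: t')) = true
      rcases hp with rfl | hp
      · simp only [decide_eq_true h1, decide_eq_true h2, Bool.and_self, Bool.true_or]
      · rw [ih p (by simpa using hp) h1 h2, Bool.or_true]

-- D_ yields an adjacent oversized pair among the kept sets
theorem D_to_adj (X Z1 : List Int) (gen : List (List Int)) (hD : D_get_minimals X Z1 gen) :
    hasAdjB (pvMinS Z1.length (pvKept X Z1 gen)) (pvKept X Z1 gen) = true := by
  have hD' : ∃ q ∈ ((pvKept X Z1 gen).map List.length).zipWith min
        ((pvKept X Z1 gen).map List.length).tail,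
      ∃ r ∈ (pvKept X Z1 gen).map List.length, 0 < r ∧ r < q := hD
  rcases hD' with ⟨q, hq, r, hr, hrpos, hrq⟩
  rcases List.mem_map.mp hr with ⟨wr, hwr, hwrlen⟩
  have hmr : pvMinS Z1.length (pvKept X Z1 gen) ≤ r := by
    have := (minS_le (pvKept X Z1 gen) Z1.length).2 wr hwr (by omega)
    omega
  rw [zipmin_map] at hq
  rcases List.mem_map.mp hq with ⟨p, hpmem, rfl⟩
  rw [← List.map_tail, List.zip_map] at hpmem
  rcases List.mem_map.mp hpmem with ⟨pr, hprmem, rfl⟩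
  exact zip_adj_to_hasAdj _ (pvKept X Z1 gen) pr hprmem (by simp at hrq ⊢; omega)
    (by simp at hrq ⊢; omega)

-- if an adjacent oversized pair lies ahead, or a passed oversized element remains,
-- the removal scan returns a list still holding an oversized element
theorem removeLoop_ne (m : Nat) : ∀ (n : Nat) (right : List (List Int)), right.length ≤ n →
    ∀ (left : List (List Int)),
    (hasAdjB m right = true ∨ ∃ z ∈ left, m < z.length) →
    ∃ w ∈ pvRemoveLoop (left ++ right) left.length m, m < w.length := by
  intro n
  induction n with
  | zero =>
    intro right hrn left hinv
    have : right = [] := List.eq_nil_of_length_eq_zero (by omega)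
    subst this
    rw [pvRemoveLoop, dif_neg (by simp)]
    rcases hinv with h | ⟨z, hz, hzl⟩
    · cases h
    · exact ⟨z, by simpa using hz, hzl⟩
  | succ n ih =>
    intro right hrn left hinv
    cases right with
    | nil =>
      rw [pvRemoveLoop, dif_neg (by simp)]
      rcases hinv with h | ⟨z, hz, hzl⟩
      · cases h
      · exact ⟨z, by simpa using hz, hzl⟩
    | cons v rest =>
      have hk : left.length < (left ++ v :: rest).length := by simp
      rw [pvRemoveLoop, dif_pos hk, getElem_append_cons_len left v rest hk]
      by_cases hov : v.length > m
      · simp only [if_pos hov]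
        by_cases hmatch : left.any (fun w => PySem.Set.equal w v) = true
        · have he := eraseFirst_append_of_match left v (v :: rest) hmatch
          rw [he.1]
          cases rest with
          | nil =>
            rw [pvRemoveLoop, dif_neg (by simp; omega)]
            exact ⟨v, by simp, hov⟩
          | cons c rest' =>
            have h1 : pvEraseFirst left v ++ v :: c :: rest'
                = (pvEraseFirst left v ++ [v] ++ [c]) ++ rest' := by simp
            have h2 : left.length + 1 = (pvEraseFirst left v ++ [v] ++ [c]).length := by
              simp only [List.length_append, List.length_cons, List.length_nil]
              omega
            rw [h1, h2]
            apply ih rest' (by simp only [List.length_cons] at hrn; omega)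
            exact Or.inr ⟨v, by simp, hov⟩
        · rw [Bool.not_eq_true] at hmatch
          rw [eraseFirst_append_of_no_match left v rest hmatch]
          cases rest with
          | nil =>
            rw [pvRemoveLoop, dif_neg (by simp)]
            rcases hinv with h | ⟨z, hz, hzl⟩
            · simp [hasAdjB] at h
            · exact ⟨z, by simpa using hz, hzl⟩
          | cons c rest' =>
            have h1 : left ++ c :: rest' = (left ++ [c]) ++ rest' := by simp
            have h2 : left.length + 1 = (left ++ [c]).length := by simp
            rw [h1, h2]
            apply ih rest' (by simp only [List.length_cons] at hrn; omega)
            rcases hinv with h | ⟨z, hz, hzl⟩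
            · have h' : ((decide (m < v.length) && decide (m < c.length))
                  || hasAdjB m (c :: rest')) = true := h
              rcases Bool.or_eq_true_iff.mp h' with hh | hh
              · have hc : m < c.length := by
                  simpa using (Bool.and_eq_true_iff.mp hh).2
                exact Or.inr ⟨c, by simp, hc⟩
              · cases rest' with
                | nil => simp [hasAdjB] at hh
                | cons d r'' =>
                  have h'' : ((decide (m < c.length) && decide (m < d.length))
                      || hasAdjB m (d :: r'')) = true := hh
                  rcases Bool.or_eq_true_iff.mp h'' with h3 | h3
                  · have hc : m < c.length := by
                      simpa using (Bool.and_eq_true_iff.mp h3).1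
                    exact Or.inr ⟨c, by simp, hc⟩
                  · exact Or.inl h3
            · exact Or.inr ⟨z, by simp [hz], hzl⟩
      · simp only [if_neg hov]
        have h1 : left ++ v :: rest = (left ++ [v]) ++ rest := by simp
        have h2 : left.length + 1 = (left ++ [v]).length := by simp
        rw [h1, h2]
        apply ih rest (by simp only [List.length_cons] at hrn; omega)
        rcases hinv with h | ⟨z, hz, hzl⟩
        · cases rest with
          | nil => simp [hasAdjB] at h
          | cons c rest' =>
            have h' : ((decide (m < v.length) && decide (m < c.length))
                || hasAdjB m (c :: rest')) = true := h
            have hv : decide (m < v.length) = false := by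
              simp only [decide_eq_false_iff_not]; omega
            rw [hv, Bool.false_and, Bool.false_or] at h'
            exact Or.inl h'
        · exact Or.inr ⟨z, by simp [hz], hzl⟩

-- the two programs, reduced to their common kept list and minimum (gen ≠ [])
theorem A_eq (X Z1 : List Int) (gen : List (List Int)) (hg : gen ≠ []) :
    get_minimals X Z1 gen
      = pvRemoveLoop (pvKept X Z1 gen) 0 (pvMinS Z1.length (pvKept X Z1 gen)) := by
  unfold get_minimals
  rw [if_neg (by simpa using hg)]
  simp only
  rw [fold_steps_eq X Z1, fold_char X Z1 gen [] Z1.length]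
  simp only [List.nil_append]

theorem B_eq (X Z1 : List Int) (gen : List (List Int)) (hg : gen ≠ []) :
    get_minimals_alt X Z1 gen
      = (pvKept X Z1 gen).filter
          (fun w => w.length ≤ pvMinS Z1.length (pvKept X Z1 gen)) := by
  unfold get_minimals_alt
  rw [if_neg (by simpa [List.isEmpty_iff] using hg)]
  simp only
  have hkeq : (List.filter (fun Rk => PySem.Set.issubset Rk (PySem.Set.ofList Z1))
      (List.map (fun Sk => PySem.Set.diff (PySem.Set.ofList Sk) (PySem.Set.ofList X)) gen))
      = pvKept X Z1 gen :=
    List.filter_congr (fun a _ => issubset_ofList a Z1)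
  rw [hkeq, minB_eq]

theorem witness_A :
    get_minimals [] [1, 2, 3] [[1, 2], [1, 3], [1]] = [[1, 3], [1]] := by
  have s0 : get_minimals [] [1, 2, 3] [[1, 2], [1, 3], [1]]
      = pvRemoveLoop [[1, 2], [1, 3], [1]] 0 1 := rfl
  have s1 : pvRemoveLoop [[1, 2], [1, 3], [1]] 0 1 = pvRemoveLoop [[1, 3], [1]] 1 1 := by
    rw [pvRemoveLoop]; exact rfl
  have s2 : pvRemoveLoop [[1, 3], [1]] 1 1 = pvRemoveLoop [[1, 3], [1]] 2 1 := by
    rw [pvRemoveLoop]; exact rfl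
  have s3 : pvRemoveLoop [[1, 3], [1]] 2 1 = [[1, 3], [1]] := by
    rw [pvRemoveLoop]; exact rfl
  rw [s0, s1, s2, s3]

theorem witness_B :
    get_minimals_alt [] [1, 2, 3] [[1, 2], [1, 3], [1]] = [[1]] := by
  decide

-- ===== VERDICT (by name: the statement is the Claim_ definition above) =====
theorem get_minimals_spec : Claim_unchanged_get_minimals := by
  intro X Z1 gen _ hD
  by_cases hg : gen = []
  · subst hg
    show get_minimals X Z1 [] = get_minimals_alt X Z1 []
    rfl
  · show get_minimals X Z1 gen = get_minimals_alt X Z1 gen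
    rw [A_eq X Z1 gen hg, B_eq X Z1 gen hg]
    -- ¬D_: the removal scan on the kept lengths never skips an oversized entry
    have hold : ((((pvKept X Z1 gen).map List.length).zip ((pvKept X Z1 gen).map List.length).tail).any
        fun p => decide (pvMinS Z1.length (pvKept X Z1 gen) < p.1) &&
                 decide (pvMinS Z1.length (pvKept X Z1 gen) < p.2)) = false := by
      rcases Bool.eq_false_or_eq_true ((((pvKept X Z1 gen).map List.length).zip ((pvKept X Z1 gen).map List.length).tail).any
          fun p => decide (pvMinS Z1.length (pvKept X Z1 gen) < p.1) &&
                   decide (pvMinS Z1.length (pvKept X Z1 gen) < p.2)) with h | h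
      · exact absurd (old_to_new X Z1 gen h) hD
      · exact h
    have hsb : pvSkipBad (pvMinS Z1.length (pvKept X Z1 gen))
        ((pvKept X Z1 gen).map List.length) = false :=
      adj_false _ ((pvKept X Z1 gen).map List.length).length _ (le_refl _) hold
    have := removeLoop_eq_filter (pvMinS Z1.length (pvKept X Z1 gen))
        (pvKept X Z1 gen).length (pvKept X Z1 gen) (le_refl _) hsb
        (nodup_kept X Z1 gen) [] (by intro w hw; cases hw)
    simp only [List.nil_append, List.length_nil] at this
    exact this

theorem get_minimals_changed : Claim_changed_get_minimals := by
  unfold Claim_changed_get_minimals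
  refine ⟨by decide, by decide, witness_A, witness_B, by decide⟩

theorem get_minimals_tight : Claim_exact_get_minimals := by
  intro X Z1 gen _ hD
  have hg : gen ≠ [] := by
    intro h
    subst h
    rcases hD with ⟨q, hq, _⟩
    cases hq
  rw [A_eq X Z1 gen hg, B_eq X Z1 gen hg]
  intro heq
  rcases removeLoop_ne (pvMinS Z1.length (pvKept X Z1 gen)) (pvKept X Z1 gen).length
      (pvKept X Z1 gen) (le_refl _) [] (Or.inl (D_to_adj X Z1 gen hD)) with ⟨w, hwmem, hwlen⟩
  simp only [List.nil_append, List.length_nil] at hwmem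
  rw [heq] at hwmem
  have := (List.mem_filter.mp hwmem).2
  simp at this
  omega
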